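-- pv_equiv track=rewrite | github.com/huggin/gfg | string/palindrome_minimum_sum.py | minimumSum
-- ===== SOURCE A (Python) =====
-- def minimumSum(s: str) -> int:
--     # code here
--     n = len(s)
--     ans = 0
--     prev = -1
--     for i in range(n // 2):
--         if s[i] == "?":
--             if s[n - 1 - i] != "?":
--                 if prev != -1:
--                     ans += abs(prev - ord(s[n - 1 - i]))
--                 prev = ord(s[n - 1 - i])
--         elif s[n - 1 - i] == "?":
--             if prev != -1:
--                 ans += abs(prev - ord(s[i]))
--             prev = ord(s[i])
--         elif s[i] != s[n - 1 - i]: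
--             return -1
--         else:
--             if prev != -1:
--                 ans += abs(prev - ord(s[i]))
--             prev = ord(s[i])
--
--     return ans * 2
-- ===== SOURCE B (Python) =====
-- def minimumSum(s: str) -> int:
--     n = len(s)
--
--     def single(i):
--         # summary of the one pair (i, n-1-i): None = conflict,
--         # else (sum, first determined value, last determined value)
--         a, b = s[i], s[n - 1 - i]
--         if a == "?":
--             if b != "?":
--                 v = ord(b)
--             else:
--                 return (0, None, None)
--         elif b == "?":
--             v = ord(a)
--         elif a != b:
--             return None
--         else:
--             v = ord(a)
--         return (0, v, v)
--
--     def combine(x, y):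
--         if x is None or y is None:
--             return None
--         s1, f1, l1 = x
--         s2, f2, l2 = y
--         gap = abs(l1 - f2) if l1 is not None and f2 is not None else 0
--         return (s1 + s2 + gap,
--                 f1 if f1 is not None else f2,
--                 l2 if l2 is not None else l1)
--
--     def solve(lo, hi):
--         if hi <= lo:
--             return (0, None, None)
--         if hi == lo + 1:
--             return single(lo)
--         mid = (lo + hi) // 2
--         return combine(solve(lo, mid), solve(mid, hi))
--
--     r = solve(0, n // 2)
--     return -1 if r is None else 2 * r[0]
-- ===== Notes on version B (the rewrite author's own statement) =====
-- stated objective: alternative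
-- what changed: B solves the problem by divide-and-conquer over the pair indices, summarising each segment as an associative (sum, first-determined, last-determined) triple (None = conflict) and combining halves bottom-up, instead of A's sequential left-to-right scan threading a prev/ans accumulator.
import Mathlib
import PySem

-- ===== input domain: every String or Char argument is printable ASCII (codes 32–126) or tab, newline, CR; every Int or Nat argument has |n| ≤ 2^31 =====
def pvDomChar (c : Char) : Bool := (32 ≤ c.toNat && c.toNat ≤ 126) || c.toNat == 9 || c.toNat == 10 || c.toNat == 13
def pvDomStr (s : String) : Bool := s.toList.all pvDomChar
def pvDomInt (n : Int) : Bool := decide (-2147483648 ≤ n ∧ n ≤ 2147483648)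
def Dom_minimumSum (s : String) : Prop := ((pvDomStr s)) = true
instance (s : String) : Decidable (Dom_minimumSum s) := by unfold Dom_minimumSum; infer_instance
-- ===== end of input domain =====

-- B replaces A's sequential left-to-right scan (prev/ans accumulator) by a divide-and-conquer
-- over the pair indices with an associative segment summary (sum, first, last) (objective: alternative).

-- ===== PORT A =====
-- loop over i in range(n//2) with state (ans, prev); returns ans*2 at the end, -1 on mismatch.
-- Indices i and n-1-i are always in range for i < n/2, so List.getD is exact here.
def minimumSum_loopA (cs : List Char) (n : Nat) : List Nat → Int → Int → Int
  | [], ans, _ => ans * 2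
  | i :: rest, ans, prev =>
      let a := cs.getD i ' '
      let b := cs.getD (n - 1 - i) ' '
      if a = '?' then
        if b ≠ '?' then
          minimumSum_loopA cs n rest
            (if prev ≠ -1 then ans + |prev - (b.toNat : Int)| else ans) (b.toNat : Int)
        else minimumSum_loopA cs n rest ans prev
      else if b = '?' then
        minimumSum_loopA cs n rest
          (if prev ≠ -1 then ans + |prev - (a.toNat : Int)| else ans) (a.toNat : Int)
      else if a ≠ b then -1
      else
        minimumSum_loopA cs n rest
          (if prev ≠ -1 then ans + |prev - (a.toNat : Int)| else ans) (a.toNat : Int)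

def minimumSum (s : String) : Int :=
  let cs := s.toList
  let n := cs.length
  minimumSum_loopA cs n (List.range (n / 2)) 0 (-1)

-- ===== PORT B =====
-- summary of one pair: none = conflict, some (sum, first determined, last determined)
def msSingle (cs : List Char) (n : Nat) (i : Nat) : Option (Int × Option Int × Option Int) :=
  let a := cs.getD i ' '
  let b := cs.getD (n - 1 - i) ' '
  if a = '?' then
    if b ≠ '?' then some (0, some (b.toNat : Int), some (b.toNat : Int))
    else some (0, none, none)
  else if b = '?' then some (0, some (a.toNat : Int), some (a.toNat : Int))
  else if a ≠ b then none
  else some (0, some (a.toNat : Int), some (a.toNat : Int))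

def msGap : Option Int → Option Int → Int
  | some l1, some f2 => |l1 - f2|
  | _, _ => 0

def msCombine : Option (Int × Option Int × Option Int) → Option (Int × Option Int × Option Int) →
    Option (Int × Option Int × Option Int)
  | some (s1, f1, l1), some (s2, f2, l2) =>
      some (s1 + s2 + msGap l1 f2,
            (match f1 with | some _ => f1 | none => f2),
            (match l2 with | some _ => l2 | none => l1))
  | _, _ => none

def msSolve (cs : List Char) (n : Nat) (lo hi : Nat) : Option (Int × Option Int × Option Int) :=
  if hi ≤ lo then some (0, none, none)
  else if hi = lo + 1 then msSingle cs n lo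
  else msCombine (msSolve cs n lo ((lo + hi) / 2)) (msSolve cs n ((lo + hi) / 2) hi)
termination_by hi - lo
decreasing_by all_goals omega

def minimumSum_alt (s : String) : Int :=
  let cs := s.toList
  let n := cs.length
  match msSolve cs n 0 (n / 2) with
  | none => -1
  | some (sm, _, _) => 2 * sm

-- ===== PRECONDITION & SPEC =====
def Spec_minimumSum (s : String) (out : Int) : Prop := out = minimumSum_alt s
instance (s : String) (out : Int) : Decidable (Spec_minimumSum s out) := by unfold Spec_minimumSum; infer_instance

-- ===== CLAIM (what is proved, stated in full; the proofs are below) =====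
def Claim_equal_minimumSum : Prop := ∀ (s : String), Dom_minimumSum s → Spec_minimumSum s (minimumSum s)

-- ===== LEMMAS AND PROOFS =====

def msFold (L : List (Option (Int × Option Int × Option Int))) :
    Option (Int × Option Int × Option Int) :=
  L.foldr msCombine (some (0, none, none))

def msOK : Option (Int × Option Int × Option Int) → Prop
  | none => True
  | some (_, f, l) => f.isSome = l.isSome

theorem msOK_single (cs : List Char) (n i : Nat) : msOK (msSingle cs n i) := by
  simp only [msSingle]
  split_ifs <;> simp [msOK]

theorem msOK_combine (a b : Option (Int × Option Int × Option Int)) (ha : msOK a) (hb : msOK b) :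
    msOK (msCombine a b) := by
  rcases a with _ | ⟨s1, f1, l1⟩ <;> rcases b with _ | ⟨s2, f2, l2⟩ <;>
    simp [msCombine, msOK] at *
  rcases f1 with _ | x <;> rcases l1 with _ | y <;> rcases f2 with _ | z <;> rcases l2 with _ | w <;>
    simp_all

theorem msOK_fold (L : List (Option (Int × Option Int × Option Int)))
    (h : ∀ e ∈ L, msOK e) : msOK (msFold L) := by
  induction L with
  | nil => simp [msFold, msOK]
  | cons e t ih =>
      have := msOK_combine e (msFold t) (h e (by simp)) (ih (fun x hx => h x (by simp [hx])))
      simpa [msFold] using this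

theorem msCombine_ident_left (x : Option (Int × Option Int × Option Int)) :
    msCombine (some (0, none, none)) x = x := by
  rcases x with _ | ⟨s2, f2, l2⟩
  · rfl
  · rcases l2 with _ | w <;> simp [msCombine, msGap]

theorem msCombine_ident_right (x : Option (Int × Option Int × Option Int)) :
    msCombine x (some (0, none, none)) = x := by
  rcases x with _ | ⟨s1, f1, l1⟩
  · rfl
  · rcases f1 with _ | x <;> rcases l1 with _ | y <;> simp [msCombine, msGap]

theorem msAssoc (a b c : Option (Int × Option Int × Option Int)) (hb : msOK b) :
    msCombine (msCombine a b) c = msCombine a (msCombine b c) := by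
  rcases a with _ | ⟨s1, f1, l1⟩ <;> rcases b with _ | ⟨s2, f2, l2⟩ <;>
    rcases c with _ | ⟨s3, f3, l3⟩ <;> simp [msCombine]
  simp [msOK] at hb
  rcases f2 with _ | x <;> rcases l2 with _ | y <;> simp_all <;>
    rcases f1 with _ | u <;> rcases l1 with _ | v <;> rcases f3 with _ | w <;> rcases l3 with _ | z <;>
      simp [msGap] <;> ring

theorem msFold_append (L1 L2 : List (Option (Int × Option Int × Option Int)))
    (h : ∀ e ∈ L1, msOK e) :
    msFold (L1 ++ L2) = msCombine (msFold L1) (msFold L2) := by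
  induction L1 with
  | nil => simp [msFold, msCombine_ident_left]
  | cons e t ih =>
      have hok : msOK (msFold t) := msOK_fold t (fun x hx => h x (by simp [hx]))
      calc msFold ((e :: t) ++ L2) = msCombine e (msFold (t ++ L2)) := by simp [msFold]
        _ = msCombine e (msCombine (msFold t) (msFold L2)) := by
              rw [ih (fun x hx => h x (by simp [hx]))]
        _ = msCombine (msCombine e (msFold t)) (msFold L2) := (msAssoc _ _ _ hok).symm
        _ = msCombine (msFold (e :: t)) (msFold L2) := by simp [msFold]

theorem msSolve_eq (cs : List Char) (n : Nat) :
    ∀ (d lo hi : Nat), hi - lo ≤ d →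
      msSolve cs n lo hi = msFold ((List.range' lo (hi - lo)).map (msSingle cs n)) := by
  intro d
  induction d with
  | zero =>
      intro lo hi h
      have hle : hi ≤ lo := by omega
      rw [msSolve]
      simp [hle, show hi - lo = 0 by omega, msFold]
  | succ d ih =>
      intro lo hi h
      rw [msSolve]
      by_cases h1 : hi ≤ lo
      · simp [h1, show hi - lo = 0 by omega, msFold]
      · by_cases h2 : hi = lo + 1
        · simp [h2, msFold, msCombine_ident_right]
        · have hlt1 : lo < (lo + hi) / 2 := by omega
          have hlt2 : (lo + hi) / 2 < hi := by omega
          simp only [h1, h2, if_false]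
          rw [ih lo ((lo + hi) / 2) (by omega), ih ((lo + hi) / 2) hi (by omega)]
          rw [← msFold_append _ _ (by
            intro e he
            simp only [List.mem_map] at he
            obtain ⟨i, _, rfl⟩ := he
            exact msOK_single cs n i)]
          rw [← List.map_append]
          congr 1
          have := @List.range'_append lo ((lo + hi) / 2 - lo) (hi - (lo + hi) / 2) 1
          simp only [one_mul] at this
          rw [show lo + ((lo + hi) / 2 - lo) = (lo + hi) / 2 by omega] at this
          rw [this, show (lo + hi) / 2 - lo + (hi - (lo + hi) / 2) = hi - lo by omega]

theorem loopA_eq (cs : List Char) (n : Nat) (L : List Nat) :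
    ∀ (ans : Int) (popt : Option Int), (∀ p, popt = some p → 0 ≤ p) →
      minimumSum_loopA cs n L ans (popt.getD (-1)) =
        (match msFold (L.map (msSingle cs n)) with
         | none => -1
         | some (sm, f, _) => (ans + sm + msGap popt f) * 2) := by
  induction L with
  | nil =>
      intro ans popt _
      rcases popt with _ | p <;> simp [minimumSum_loopA, msFold, msGap] <;> ring
  | cons i rest ih =>
      intro ans popt hp
      have hfold : msFold ((i :: rest).map (msSingle cs n)) =
          msCombine (msSingle cs n i) (msFold (rest.map (msSingle cs n))) := by
        simp [msFold]
      rw [hfold]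
      have hstep : ∀ (v : Int), 0 ≤ v →
          minimumSum_loopA cs n rest
            (if popt.getD (-1) ≠ -1 then ans + |popt.getD (-1) - v| else ans) v =
          (match msCombine (some (0, some v, some v)) (msFold (rest.map (msSingle cs n))) with
           | none => -1
           | some (sm, f, _) => (ans + sm + msGap popt f) * 2) := by
        intro v hv
        have h1 : minimumSum_loopA cs n rest
            (if popt.getD (-1) ≠ -1 then ans + |popt.getD (-1) - v| else ans) v =
            minimumSum_loopA cs n rest (ans + msGap popt (some v)) ((some v).getD (-1)) := by
          rcases popt with _ | p
          · simp [msGap]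
          · have : (0:Int) ≤ p := hp p rfl
            simp only [Option.getD_some]
            rw [if_pos (by omega)]
            simp [msGap]
        rw [h1, ih (ans + msGap popt (some v)) (some v) (by intro p hp'; cases hp'; exact hv)]
        rcases hres : msFold (rest.map (msSingle cs n)) with _ | ⟨sm, f, l⟩
        · simp [msCombine]
        · simp only [msCombine]
          have : msGap (some v) f + msGap popt (some v) = msGap popt (some v) + msGap (some v) f := by ring
          rcases f with _ | w <;> simp [msGap] <;> ring
      -- branch in lockstep with msSingle
      simp only [ne_eq, ite_not] at hstep
      simp only [minimumSum_loopA, msSingle, ne_eq, ite_not]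
      by_cases ha : cs.getD i ' ' = '?'
      · by_cases hb : cs.getD (n - 1 - i) ' ' = '?'
        · simp only [ha, hb, reduceIte]
          rw [msCombine_ident_left]
          exact ih ans popt hp
        · simp only [ha, hb, reduceIte]
          exact hstep _ (Int.natCast_nonneg _)
      · by_cases hb : cs.getD (n - 1 - i) ' ' = '?'
        · simp only [ha, hb, reduceIte]
          exact hstep _ (Int.natCast_nonneg _)
        · by_cases hab : cs.getD i ' ' = cs.getD (n - 1 - i) ' '
          · simp only [ha, hb, hab, reduceIte]
            exact hstep _ (Int.natCast_nonneg _)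
          · simp only [ha, hb, hab, reduceIte]
            simp [msCombine]

-- ===== VERDICT (by name: the statement is the Claim_ definition above) =====
theorem minimumSum_spec : Claim_equal_minimumSum := by
  intro s _
  unfold Spec_minimumSum minimumSum minimumSum_alt
  have hA := loopA_eq s.toList s.toList.length (List.range' 0 (s.toList.length / 2)) 0 none
    (by intro p h; cases h)
  have hB := msSolve_eq s.toList s.toList.length (s.toList.length / 2) 0 (s.toList.length / 2)
    (by omega)
  simp only [Option.getD_none] at hA
  simp only [Nat.sub_zero] at hB
  simp only []
  rw [List.range_eq_range', hA, hB]
  rcases h : msFold ((List.range' 0 (s.toList.length / 2)).map (msSingle s.toList s.toList.length)) with _ | ⟨sm, f, l⟩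
  · rfl
  · rcases f with _ | w <;> simp [msGap] <;> ring
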